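-- pv_equiv track=rewrite | github.com/Maxeemja/KPI_Labs | Python/DM/Lab1/fullSol.py | fullSolution
-- ===== SOURCE A (Python) =====
-- def fullSolution(U, A, B, C):
--     U = list(U)
--     A = list(A)
--     B = list(B)
--     C = list(C)
--     notA = []
--     result = []
--     for i in U:
--         if i not in A:
--             notA.append(i)
--     # проміжні множини : M , N , K , Z
--     # M= a U b ; N = a U c; K = notA U c; Z = M ⋂ N ;
--     M = []
--     N = []
--     K = []
--     Z = []
--     for i in A:
--         M.append(i)
--         N.append(i)
--     for i in B:
--         M.append(i)
--     for i in C: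
--         N.append(i)
--         K.append(i)
--     for i in notA:
--         K.append(i)
--     for i in M:
--         if i in N:
--             Z.append(i)
--     for i in Z:
--         if i in K:
--             result.append(i)
--     result.sort()
--     return set(result)
-- ===== SOURCE B (Python) =====
-- def fullSolution(U, A, B, C):
--     # Algebraic simplification: ((A|B)&(A|C))&(C|(U-A)) = C & (A|B), so U is irrelevant.
--     AB = set(A) | set(B)
--     return set(sorted(x for x in C if x in AB))
-- ===== Notes on version B (the rewrite author's own statement) =====
-- stated objective: simpler
-- what changed: Algebraically simplified A's seven-loop construction ((A|B)&(A|C))&(C|(U-A)) to the identity C&(A|B): B builds one hash set of A and B and does a single filter pass over C, never touching U.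
import Mathlib
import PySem

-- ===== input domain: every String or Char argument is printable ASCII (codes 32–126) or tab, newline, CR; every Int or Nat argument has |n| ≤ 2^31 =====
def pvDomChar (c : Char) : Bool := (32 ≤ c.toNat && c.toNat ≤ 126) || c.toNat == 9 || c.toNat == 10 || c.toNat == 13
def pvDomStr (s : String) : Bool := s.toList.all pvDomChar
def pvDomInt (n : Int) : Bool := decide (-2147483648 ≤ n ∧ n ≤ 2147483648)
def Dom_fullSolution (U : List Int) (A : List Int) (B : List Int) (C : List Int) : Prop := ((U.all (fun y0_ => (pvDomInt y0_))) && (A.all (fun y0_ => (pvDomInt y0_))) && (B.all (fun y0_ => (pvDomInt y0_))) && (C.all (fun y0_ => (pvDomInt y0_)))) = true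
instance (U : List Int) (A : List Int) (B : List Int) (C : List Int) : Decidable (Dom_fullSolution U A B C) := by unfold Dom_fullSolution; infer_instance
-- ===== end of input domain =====

-- B uses the algebraic identity ((A|B)&(A|C))&(C|(U-A)) = C&(A|B): one filter pass over C against a set of A∪B; objective: simpler.

-- ===== PORT A =====
def fullSolution (U : List Int) (A : List Int) (B : List Int) (C : List Int) : List Int :=
  -- for i in U: if i not in A: notA.append(i)
  let notA : List Int := U.foldl (fun acc i => if !(A.contains i) then acc ++ [i] else acc) []
  -- for i in A: M.append(i); N.append(i) / for i in B: M.append(i) / for i in C: N.append(i); K.append(i) / for i in notA: K.append(i)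
  let M : List Int := A ++ B
  let N : List Int := A ++ C
  let K : List Int := C ++ notA
  -- for i in M: if i in N: Z.append(i)
  let Z : List Int := M.foldl (fun acc i => if N.contains i then acc ++ [i] else acc) []
  -- for i in Z: if i in K: result.append(i)
  let result : List Int := Z.foldl (fun acc i => if K.contains i then acc ++ [i] else acc) []
  -- result.sort(); return set(result)
  PySem.Set.ofList (PySem.List.sorted result (fun x => x) false)

-- ===== PORT B =====
def fullSolution_alt (U : List Int) (A : List Int) (B : List Int) (C : List Int) : List Int :=
  -- AB = set(A) | set(B)
  let AB : PySem.Set Int := PySem.Set.union (PySem.Set.ofList A) (PySem.Set.ofList B)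
  -- return set(sorted(x for x in C if x in AB))
  PySem.Set.ofList (PySem.List.sorted (C.filter (fun x => AB.contains x)) (fun x => x) false)

-- ===== PRECONDITION & SPEC =====
def Spec_fullSolution (U : List Int) (A : List Int) (B : List Int) (C : List Int) (out : List Int) : Prop := out = fullSolution_alt U A B C
instance (U : List Int) (A : List Int) (B : List Int) (C : List Int) (out : List Int) : Decidable (Spec_fullSolution U A B C out) := by unfold Spec_fullSolution; infer_instance

-- ===== CLAIM =====
def Claim_equal_fullSolution : Prop := ∀ (U : List Int) (A : List Int) (B : List Int) (C : List Int), Dom_fullSolution U A B C → Spec_fullSolution U A B C (fullSolution U A B C)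

-- ===== LEMMAS AND PROOFS =====

-- loop invariant: folding Set.add appends a sublist of the input (first occurrences)
theorem pv_foldl_add_sublist (xs acc : List Int) :
    ∃ t, xs.foldl PySem.Set.add acc = acc ++ t ∧ t.Sublist xs := by
  induction xs generalizing acc with
  | nil => exact ⟨[], by simp⟩
  | cons x xs ih =>
    simp only [List.foldl_cons]
    rcases ih (PySem.Set.add acc x) with ⟨t, h1, h2⟩
    rw [PySem.Set.add_eq_ite] at h1
    by_cases hx : x ∈ acc
    · exact ⟨t, by simpa [hx] using h1, h2.cons x⟩
    · exact ⟨x :: t, by simpa [hx] using h1, h2.cons₂ x⟩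

-- set(xs) is a sublist of xs
theorem pv_ofList_sublist (xs : List Int) : (PySem.Set.ofList xs).Sublist xs := by
  rw [PySem.Set.ofList_eq_foldl]
  rcases pv_foldl_add_sublist xs [] with ⟨t, h1, h2⟩
  simpa [h1]

-- set(sorted(xs)) = sorted(set(xs)) for Int lists
theorem pv_ofList_sorted (xs : List Int) :
    PySem.Set.ofList (PySem.List.sorted xs (fun x => x) false)
      = PySem.List.sorted (PySem.Set.ofList xs) (fun x => x) false := by
  refine Eq.symm (PySem.List.sorted_eq_of_perm_of_pairwise_lt _ _ _ ?_ ?_)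
  · rw [List.perm_ext_iff_of_nodup (PySem.Set.nodup_ofList _) (PySem.Set.nodup_ofList _)]
    intro a; simp [PySem.Set.mem_ofList, PySem.List.mem_sorted]
  · have hle : (PySem.Set.ofList (PySem.List.sorted xs (fun x => x) false)).Pairwise (· ≤ ·) :=
      List.Pairwise.sublist (pv_ofList_sublist _) (PySem.List.sorted_pairwise xs (fun x => x))
    have hne : (PySem.Set.ofList (PySem.List.sorted xs (fun x => x) false)).Pairwise (· ≠ ·) :=
      PySem.Set.nodup_ofList _
    exact (hle.and hne).imp (fun h => lt_of_le_of_ne h.1 h.2)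

-- ===== VERDICT =====
theorem fullSolution_spec : Claim_equal_fullSolution := by
  intro U A B C _
  show fullSolution U A B C = fullSolution_alt U A B C
  unfold fullSolution fullSolution_alt
  simp only [PySem.List.foldl_append_if_eq_filter, List.nil_append]
  rw [pv_ofList_sorted, pv_ofList_sorted]
  refine PySem.List.sorted_eq_sorted_of_perm _ _ _ (fun a b h => h) ?_
  rw [List.perm_ext_iff_of_nodup (PySem.Set.nodup_ofList _) (PySem.Set.nodup_ofList _)]
  intro a
  simp only [PySem.Set.mem_ofList, List.mem_filter, List.mem_append,
    List.contains_eq_mem, PySem.Set.contains_iff, PySem.Set.mem_union, Bool.not_eq_true',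
    decide_eq_true_eq, decide_eq_false_iff_not]
  tauto
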